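-- pv_equiv track=rewrite | github.com/Stars1233/IntFold | intellifold/data/template/template_featurizer.py | get_safe_entity_id_for_template_copy
-- ===== SOURCE A (Python) =====
-- from typing import Any, Dict, List, Mapping, Optional, Sequence, Tuple, Union
--
-- def get_safe_entity_id_for_template_copy(
--     bioassembly: Mapping[int, Mapping[str, Any]],
-- ) -> List[str]:
--     """Identifies entity IDs that have consistent sequences across all chains."""
--     eid_to_seqs = {}
--     for aid, info in bioassembly.items():
--         eid = info["entity_id"]
--         seq = info["sequence"]
--         eid_to_seqs.setdefault(eid, set()).add(seq)
--     return [eid for eid, seqs in eid_to_seqs.items() if len(seqs) == 1]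
-- ===== SOURCE B (Python) =====
-- from typing import Any, List, Mapping
--
-- def get_safe_entity_id_for_template_copy(
--     bioassembly: Mapping[int, Mapping[str, Any]],
-- ) -> List[str]:
--     """Identifies entity IDs that have consistent sequences across all chains."""
--     pairs = [(info["entity_id"], info["sequence"]) for info in bioassembly.values()]
--     result = []
--     seen = set()
--     for eid, seq0 in pairs:
--         if eid in seen:
--             continue
--         seen.add(eid)
--         if all(s == seq0 for e, s in pairs if e == eid):
--             result.append(eid)
--     return result
-- ===== Notes on version B (the rewrite author's own statement) =====
-- stated objective: alternative
-- what changed: A groups sequences into a dict of per-entity distinct-sequence sets and keeps entities whose set has size 1; B flattens to an (entity_id, sequence) pair list and, at each first occurrence of an entity id, re-scans the whole pair list checking that every sequence of that entity equals the first one.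
import Mathlib
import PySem

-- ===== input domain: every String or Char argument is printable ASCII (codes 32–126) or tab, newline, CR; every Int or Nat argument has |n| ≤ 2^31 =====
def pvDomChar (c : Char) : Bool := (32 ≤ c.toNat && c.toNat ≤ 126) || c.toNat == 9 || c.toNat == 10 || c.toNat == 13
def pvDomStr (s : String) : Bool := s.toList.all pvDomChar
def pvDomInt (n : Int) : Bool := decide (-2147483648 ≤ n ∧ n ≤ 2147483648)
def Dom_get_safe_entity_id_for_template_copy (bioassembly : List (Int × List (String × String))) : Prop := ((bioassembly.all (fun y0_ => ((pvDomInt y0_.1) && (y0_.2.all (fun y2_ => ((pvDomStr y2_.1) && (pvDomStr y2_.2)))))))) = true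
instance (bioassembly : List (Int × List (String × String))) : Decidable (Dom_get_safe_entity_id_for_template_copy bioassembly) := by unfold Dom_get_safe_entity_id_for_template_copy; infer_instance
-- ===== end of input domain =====

-- B replaces A's dict of per-entity distinct-sequence sets by a flat (eid, seq) pair list with a
-- nested re-scan per first-seen entity id (all sequences equal the first); objective: alternative.

-- ===== PORT A =====
-- A iterates the dict's items; the assoc-list argument is read with Python dict semantics
-- (PySem.Dict.ofList: duplicate keys overwrite in place), inner dicts likewise.
def get_safe_entity_id_for_template_copy (bioassembly : List (Int × List (String × String))) : List String :=
  let eid_to_seqs : PySem.Dict String (PySem.Set String) :=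
    (PySem.Dict.ofList bioassembly).items.foldl (fun d p =>
      let eid := ((PySem.Dict.ofList p.2).get? "entity_id").getD ""
      let seq := ((PySem.Dict.ofList p.2).get? "sequence").getD ""
      d.modify eid (PySem.Set.ofList []) (fun s => PySem.Set.add s seq)) PySem.Dict.empty
  (eid_to_seqs.items.filter (fun q => q.2.length == 1)).map Prod.fst

-- ===== PORT B =====
-- B's helper: the flat [(entity_id, sequence)] list built from the dict's values.
def pvPairs (bioassembly : List (Int × List (String × String))) : List (String × String) :=
  (PySem.Dict.ofList bioassembly).values.map (fun info =>
    (((PySem.Dict.ofList info).get? "entity_id").getD "",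
     ((PySem.Dict.ofList info).get? "sequence").getD ""))

-- B's main loop: walk the pair list; at each unseen entity id, re-scan all pairs and keep the id
-- iff every sequence of that entity equals the current (first) one.
def pvBLoop (pairs : List (String × String)) : List (String × String) → PySem.Set String → List String
  | [], _ => []
  | p :: rest, seen =>
    if PySem.Set.contains seen p.1 then pvBLoop pairs rest seen
    else if (pairs.filter (fun q => q.1 == p.1)).all (fun q => q.2 == p.2) then
      p.1 :: pvBLoop pairs rest (PySem.Set.add seen p.1)
    else pvBLoop pairs rest (PySem.Set.add seen p.1)

def get_safe_entity_id_for_template_copy_alt (bioassembly : List (Int × List (String × String))) : List String :=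
  pvBLoop (pvPairs bioassembly) (pvPairs bioassembly) (PySem.Set.ofList [])

-- ===== PRECONDITION & SPEC =====
-- Pre_ excludes inputs where a chain's info dict lacks the key "entity_id" or "sequence",
-- on which Python A raises KeyError.
def Pre_get_safe_entity_id_for_template_copy (bioassembly : List (Int × List (String × String))) : Prop :=
  ∀ info ∈ (PySem.Dict.ofList bioassembly).values,
    "entity_id" ∈ info.map Prod.fst ∧ "sequence" ∈ info.map Prod.fst
instance (bioassembly : List (Int × List (String × String))) : Decidable (Pre_get_safe_entity_id_for_template_copy bioassembly) := by unfold Pre_get_safe_entity_id_for_template_copy; infer_instance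
def pvWitness_get_safe_entity_id_for_template_copy : (List (Int × List (String × String))) :=
  [(1, [("entity_id", "A"), ("sequence", "MKV")]), (2, [("entity_id", "A"), ("sequence", "MKV")])]
def Spec_get_safe_entity_id_for_template_copy (bioassembly : List (Int × List (String × String))) (out : List String) : Prop := out = get_safe_entity_id_for_template_copy_alt bioassembly
instance (bioassembly : List (Int × List (String × String))) (out : List String) : Decidable (Spec_get_safe_entity_id_for_template_copy bioassembly out) := by unfold Spec_get_safe_entity_id_for_template_copy; infer_instance

-- ===== CLAIM (what is proved, stated in full; the proofs are below) =====
def Claim_equal_get_safe_entity_id_for_template_copy : Prop := ∀ (bioassembly : List (Int × List (String × String))), Dom_get_safe_entity_id_for_template_copy bioassembly → Pre_get_safe_entity_id_for_template_copy bioassembly → Spec_get_safe_entity_id_for_template_copy bioassembly (get_safe_entity_id_for_template_copy bioassembly)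

-- ===== LEMMAS AND PROOFS =====

def pvExtr (p : Int × List (String × String)) : String × String :=
  (((PySem.Dict.ofList p.2).get? "entity_id").getD "", ((PySem.Dict.ofList p.2).get? "sequence").getD "")

-- first occurrences of entity ids in `rest` that are not yet in `seen`
def pvNewKeys : List (String × String) → PySem.Set String → List String
  | [], _ => []
  | p :: t, seen =>
    if PySem.Set.contains seen p.1 then pvNewKeys t seen
    else p.1 :: pvNewKeys t (PySem.Set.add seen p.1)

lemma pvUpdate_eq_newKeys (rest : List (String × String)) :
    ∀ seen : PySem.Set String,
      PySem.Set.update seen (rest.map Prod.fst) = seen ++ pvNewKeys rest seen := by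
  induction rest with
  | nil => intro seen; simp [pvNewKeys, PySem.Set.update]
  | cons p t ih =>
    intro seen
    rw [List.map_cons, PySem.Set.update_cons, pvNewKeys]
    by_cases hc : PySem.Set.contains seen p.1 = true
    · rw [PySem.Set.add_of_mem ((PySem.Set.contains_iff _ _).mp hc), if_pos hc, ih]
    · have hnm : p.1 ∉ seen := fun h => hc ((PySem.Set.contains_iff _ _).mpr h)
      rw [if_neg hc, ih (PySem.Set.add seen p.1), PySem.Set.add_of_not_mem hnm,
        List.append_assoc, List.singleton_append]

lemma pvGetD_fold (l : List (String × String)) :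
    ∀ (d : PySem.Dict String (PySem.Set String)) (e : String),
      (l.foldl (fun d p => d.modify p.1 (PySem.Set.ofList []) (fun s => PySem.Set.add s p.2)) d).getD e (PySem.Set.ofList [])
        = ((l.filter (fun p => p.1 == e)).map Prod.snd).foldl PySem.Set.add (d.getD e (PySem.Set.ofList [])) := by
  induction l with
  | nil => intro d e; simp
  | cons p t ih =>
    intro d e
    rw [List.foldl_cons, ih, List.filter_cons]
    by_cases h : p.1 = e
    · simp [h, PySem.Dict.getD_modify_self]
    · have hb : (p.1 == e) = false := by simp [h]
      simp only [hb, Bool.false_eq_true, if_false, PySem.Dict.getD_modify]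
      rw [if_neg (fun he => h he.symm)]

lemma pvLenOne (s0 : String) (l : List String) :
    ((PySem.Set.ofList (s0 :: l)).length == 1) = l.all (fun x => x == s0) := by
  have hnd := PySem.Set.nodup_ofList (s0 :: l)
  have hmem : s0 ∈ PySem.Set.ofList (s0 :: l) := (PySem.Set.mem_ofList _ _).mpr (List.mem_cons_self)
  by_cases hall : ∀ x ∈ l, x = s0
  · have hrep : ∀ x ∈ PySem.Set.ofList (s0 :: l), x = s0 := by
      intro x hx
      rcases List.mem_cons.mp ((PySem.Set.mem_ofList _ _).mp hx) with h | h
      · exact h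
      · exact hall x h
    have heq : PySem.Set.ofList (s0 :: l) = [s0] := by
      have hpos : 0 < (PySem.Set.ofList (s0 :: l)).length := List.length_pos_of_mem hmem
      have hle : (PySem.Set.ofList (s0 :: l)).length ≤ 1 := by
        rw [List.eq_replicate_of_mem hrep] at hnd
        exact List.nodup_replicate.mp hnd
      obtain ⟨y, hy⟩ := List.length_eq_one_iff.mp (le_antisymm hle hpos)
      rw [hy, hrep y (hy ▸ List.mem_singleton_self y)]
    have hall' : l.all (fun x => x == s0) = true := by
      rw [List.all_eq_true]
      intro x hx
      simpa using hall x hx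
    rw [heq, hall']
    rfl
  · push Not at hall
    obtain ⟨x, hx, hne⟩ := hall
    have hxm : x ∈ PySem.Set.ofList (s0 :: l) := (PySem.Set.mem_ofList _ _).mpr (List.mem_cons_of_mem _ hx)
    have h1 : ((PySem.Set.ofList (s0 :: l)).length == 1) = false := by
      rw [beq_eq_false_iff_ne]
      intro hlen
      obtain ⟨y, hy⟩ := List.length_eq_one_iff.mp hlen
      rw [hy] at hmem hxm
      simp only [List.mem_singleton] at hmem hxm
      exact hne (hxm.trans hmem.symm)
    have h2 : l.all (fun x => x == s0) = false := by
      rcases Bool.eq_false_or_eq_true (l.all fun x => x == s0) with h | h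
      · exact absurd (by simpa using List.all_eq_true.mp h x hx) hne
      · exact h
    rw [h1, h2]

lemma pvBLoop_eq (pairs : List (String × String)) :
    ∀ (rest pre : List (String × String)) (seen : PySem.Set String),
      pairs = pre ++ rest →
      (∀ e, PySem.Set.contains seen e = true ↔ e ∈ pre.map Prod.fst) →
      pvBLoop pairs rest seen
        = (pvNewKeys rest seen).filter
            (fun e => (PySem.Set.ofList (((pairs.filter (fun q => q.1 == e)).map Prod.snd))).length == 1) := by
  intro rest
  induction rest with
  | nil => intro pre seen _ _; rfl
  | cons p t ih =>
    intro pre seen hsplit hseen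
    rw [pvBLoop, pvNewKeys]
    by_cases hc : PySem.Set.contains seen p.1 = true
    · rw [if_pos hc, if_pos hc]
      exact ih (pre ++ [p]) seen (by simpa using hsplit) (by
        intro e
        rw [hseen e, List.map_append, List.mem_append]
        constructor
        · exact Or.inl
        · rintro (h | h)
          · exact h
          · simp only [List.map_cons, List.map_nil, List.mem_singleton] at h
            subst h; exact (hseen p.1).mp hc)
    · have hpre : p.1 ∉ pre.map Prod.fst := fun h => hc ((hseen p.1).mpr h)
      have hfilpre : pre.filter (fun q => (q.1 == p.1)) = [] := by
        rw [List.filter_eq_nil_iff]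
        intro q hq
        simp only [beq_iff_eq]
        exact fun h => hpre (h ▸ List.mem_map_of_mem hq)
      have hfil : pairs.filter (fun q => q.1 == p.1) = p :: t.filter (fun q => q.1 == p.1) := by
        rw [hsplit, List.filter_append, hfilpre, List.nil_append, List.filter_cons,
          if_pos (by simp)]
      have hcond : ((pairs.filter (fun q => q.1 == p.1)).all (fun q => q.2 == p.2))
          = ((PySem.Set.ofList (((pairs.filter (fun q => q.1 == p.1)).map Prod.snd))).length == 1) := by
        rw [hfil, List.map_cons, pvLenOne, List.all_cons, beq_self_eq_true, Bool.true_and,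
          List.all_map]
        rfl
      have hinv : ∀ e, PySem.Set.contains (PySem.Set.add seen p.1) e = true ↔ e ∈ (pre ++ [p]).map Prod.fst := by
        intro e
        rw [PySem.Set.contains_iff, PySem.Set.mem_add, List.map_append, List.mem_append]
        simp only [List.map_cons, List.map_nil, List.mem_singleton]
        rw [← PySem.Set.contains_iff, hseen e]
      rw [if_neg hc, if_neg hc, List.filter_cons, ← hcond]
      by_cases hk : ((pairs.filter (fun q => q.1 == p.1)).all (fun q => q.2 == p.2)) = true
      · rw [if_pos hk, if_pos hk, ih (pre ++ [p]) (PySem.Set.add seen p.1) (by simpa using hsplit) hinv]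
      · rw [if_neg hk, if_neg (by simpa using hk),
          ih (pre ++ [p]) (PySem.Set.add seen p.1) (by simpa using hsplit) hinv]

lemma pvPairs_eq (bioassembly : List (Int × List (String × String))) :
    pvPairs bioassembly = (PySem.Dict.ofList bioassembly).items.map pvExtr := by
  simp [pvPairs, PySem.Dict.values, List.map_map, pvExtr, Function.comp]

lemma pvA_eq (bioassembly : List (Int × List (String × String))) :
    get_safe_entity_id_for_template_copy bioassembly
      = (pvNewKeys (pvPairs bioassembly) (PySem.Set.ofList [])).filter
          (fun e => (PySem.Set.ofList ((((pvPairs bioassembly).filter (fun q => q.1 == e)).map Prod.snd))).length == 1) := by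
  have hfold : get_safe_entity_id_for_template_copy bioassembly
      = ((((pvPairs bioassembly).foldl (fun d p => d.modify p.1 (PySem.Set.ofList []) (fun s => PySem.Set.add s p.2))
            PySem.Dict.empty).items.filter (fun q => q.2.length == 1)).map Prod.fst) := by
    rw [pvPairs_eq]
    simp only [get_safe_entity_id_for_template_copy, List.foldl_map, pvExtr]
  set pairs := pvPairs bioassembly with hp
  set D := pairs.foldl (fun d p => d.modify p.1 (PySem.Set.ofList []) (fun s => PySem.Set.add s p.2))
      PySem.Dict.empty with hD
  have hkeys : D.keys = pvNewKeys pairs (PySem.Set.ofList []) := by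
    rw [hD, PySem.Dict.keys_foldl_modify_key pairs Prod.fst (PySem.Set.ofList []) (fun _ p => fun s => PySem.Set.add s p.2) PySem.Dict.empty,
      PySem.Dict.keys_empty, PySem.Set.update_nil_left, PySem.Set.ofList_eq_foldl]
    have := pvUpdate_eq_newKeys pairs (PySem.Set.ofList [])
    rw [PySem.Set.update] at this
    simpa [PySem.Set.ofList_eq_foldl] using this
  have hnd : D.keys.Nodup := by
    rw [hD]
    exact PySem.Dict.nodup_keys_foldl_modify_key pairs Prod.fst (PySem.Set.ofList [])
      (fun _ p => fun s => PySem.Set.add s p.2) PySem.Dict.empty (by simp)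
  have hgetD : ∀ e, D.getD e (PySem.Set.ofList [])
      = PySem.Set.ofList ((pairs.filter (fun q => q.1 == e)).map Prod.snd) := by
    intro e
    rw [hD, pvGetD_fold, PySem.Dict.getD_empty]
    rfl
  rw [hfold, PySem.Dict.items_eq_map_keys D hnd (PySem.Set.ofList []), List.filter_map,
    List.map_map]
  have hcomp : (Prod.fst ∘ fun k => (k, D.getD k (PySem.Set.ofList []))) = id := rfl
  rw [hcomp, List.map_id, hkeys]
  apply List.filter_congr
  intro e _
  simp only [Function.comp_apply, hgetD e]

-- ===== VERDICT (by name: the statement is the Claim_ definition above) =====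
theorem get_safe_entity_id_for_template_copy_spec : Claim_equal_get_safe_entity_id_for_template_copy := by
  intro bioassembly _ _
  unfold Spec_get_safe_entity_id_for_template_copy
  rw [pvA_eq]
  unfold get_safe_entity_id_for_template_copy_alt
  rw [pvBLoop_eq (pvPairs bioassembly) (pvPairs bioassembly) [] (PySem.Set.ofList [])
    (by simp) (by intro e; simp [PySem.Set.contains, PySem.Set.ofList])]
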